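-- pv_equiv track=rewrite | github.com/Lightning-AI/torchmetrics | torchmetrics/functional/text/meteor.py | _match_enums
-- ===== SOURCE A (Python) =====
-- from typing import Any, List, NamedTuple, Optional, Sequence, Set, Tuple, Union
--
-- def _match_enums(
--     enum_reference: List[Tuple[int, str]], enum_hypothesis: List[Tuple[int, str]], function_words: Sequence[str]
-- ) -> Tuple[List[Tuple[int, int]], List[Tuple[int, int]], List[Tuple[int, str]], List[Tuple[int, str]]]:
--     """Align/match words in the hypothesis to the reference.
--
--     Args:
--         enum_reference:
--             An enumerated list of a tokenized reference.
--         enum_hypothesis: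
--             An enumerated list of a tokenized hypothessis.
--
--     Returns:
--         A tuple of lists:
--             A list of tuples mapping matched reference and hypothesis words.
--             An enumerated list of unmatched reference words.
--             An enumerated list of unmatched hypothesis words.
--     """
--     content_word_match = []
--     function_word_match = []
--     for i in range(len(enum_hypothesis))[::-1]:
--         for j in range(len(enum_reference))[::-1]:
--             if enum_hypothesis[i][1] == enum_reference[j][1]:
--                 if enum_hypothesis[i][1] in function_words:
--                     function_word_match.append((enum_reference[j][0], enum_hypothesis[i][0]))
--                 else:
--                     content_word_match.append((enum_reference[j][0], enum_hypothesis[i][0]))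
--                 enum_hypothesis.pop(i)
--                 enum_reference.pop(j)
--                 break
--     return content_word_match, function_word_match, enum_reference, enum_hypothesis
-- ===== SOURCE B (Python) =====
-- def _match_enums(enum_reference, enum_hypothesis, function_words):
--     fw = set(function_words)
--     stacks = {}  # word -> stack of reference ids, in reference order
--     for rid, word in enum_reference:
--         stacks.setdefault(word, []).append(rid)
--     popped = {}  # word -> how many of its last reference occurrences were matched
--     content_word_match = []
--     function_word_match = []
--     kept_rev = []
--     for item in reversed(enum_hypothesis):
--         stack = stacks.get(item[1])
--         if stack:
--             rid = stack.pop()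
--             popped[item[1]] = popped.get(item[1], 0) + 1
--             if item[1] in fw:
--                 function_word_match.append((rid, item[0]))
--             else:
--                 content_word_match.append((rid, item[0]))
--         else:
--             kept_rev.append(item)
--     ref_rev = []
--     for item in reversed(enum_reference):
--         n = popped.get(item[1], 0)
--         if n:
--             popped[item[1]] = n - 1
--         else:
--             ref_rev.append(item)
--     enum_reference[:] = ref_rev[::-1]
--     enum_hypothesis[:] = kept_rev[::-1]
--     return content_word_match, function_word_match, enum_reference, enum_hypothesis
-- ===== Notes on version B (the rewrite author's own statement) =====
-- stated objective: alternative
-- what changed: Replaces the backwards nested scan (each hypothesis word rescans the whole shrinking reference list) by a dict word->stack of reference ids popped per hypothesis word, a popped-per-word counter sweep that rebuilds the remaining reference, and a set for the function-word test.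
import Mathlib
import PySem

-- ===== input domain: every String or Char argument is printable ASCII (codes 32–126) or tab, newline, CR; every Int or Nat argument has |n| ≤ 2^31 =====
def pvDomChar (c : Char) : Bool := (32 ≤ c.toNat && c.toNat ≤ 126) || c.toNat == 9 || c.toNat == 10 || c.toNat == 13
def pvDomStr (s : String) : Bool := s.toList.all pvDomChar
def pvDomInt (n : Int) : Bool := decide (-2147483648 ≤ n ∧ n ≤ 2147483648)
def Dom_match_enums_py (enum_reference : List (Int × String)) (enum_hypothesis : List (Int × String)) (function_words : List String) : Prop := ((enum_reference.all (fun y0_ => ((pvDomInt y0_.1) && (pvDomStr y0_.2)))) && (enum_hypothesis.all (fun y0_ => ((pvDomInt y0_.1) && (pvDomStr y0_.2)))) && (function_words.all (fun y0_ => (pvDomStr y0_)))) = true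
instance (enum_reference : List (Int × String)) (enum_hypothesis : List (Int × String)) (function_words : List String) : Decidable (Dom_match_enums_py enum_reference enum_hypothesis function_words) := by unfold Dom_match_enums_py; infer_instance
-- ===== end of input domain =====

-- B replaces A's backwards nested rescans of the reference by a different single-pass algorithm:
-- a dict of per-word stacks of reference ids plus a counter-driven final sweep.  Both the
-- Python A and the Python B mutate enum_reference / enum_hypothesis in place to the same remaining
-- lists; the theorems below are about the returned value.

-- ===== PORT A =====
-- inner loop: 'for j in range(len(enum_reference))[::-1]: if enum_hypothesis[i][1] == enum_reference[j][1]: <hit at j>; break'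
-- (scans j = m-1, m-2, …, 0; returns the first j from the top whose word matches, None if the loop falls through)
def aFindJ (ref : List (Int × String)) (w : String) : Nat → Option Nat
  | 0 => none
  | j + 1 => if (ref.getD j (0, "")).2 = w then some j else aFindJ ref w j
-- outer loop 'for i in range(len(enum_hypothesis))[::-1]' with the two pops; first argument i+1 means index i is processed next
def aLoop (function_words : List String) :
    Nat → List (Int × String) → List (Int × String) → List (Int × Int) → List (Int × Int) →
    (List (Int × Int)) × (List (Int × Int)) × (List (Int × String)) × (List (Int × String))
  | 0, hyp, ref, cwm, fwm => (cwm, fwm, ref, hyp)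
  | i + 1, hyp, ref, cwm, fwm =>
    match aFindJ ref (PySem.List.pyGetD hyp (i : Int) (0, "")).2 ref.length with
    | none => aLoop function_words i hyp ref cwm fwm
    | some j =>
      if (PySem.List.pyGetD hyp (i : Int) (0, "")).2 ∈ function_words then
        aLoop function_words i (hyp.eraseIdx i) (ref.eraseIdx j) cwm
          (fwm ++ [((PySem.List.pyGetD ref (j : Int) (0, "")).1, (PySem.List.pyGetD hyp (i : Int) (0, "")).1)])
      else
        aLoop function_words i (hyp.eraseIdx i) (ref.eraseIdx j)
          (cwm ++ [((PySem.List.pyGetD ref (j : Int) (0, "")).1, (PySem.List.pyGetD hyp (i : Int) (0, "")).1)]) fwm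

def match_enums_py (enum_reference : List (Int × String)) (enum_hypothesis : List (Int × String)) (function_words : List String) : (List (Int × Int)) × (List (Int × Int)) × (List (Int × String)) × (List (Int × String)) :=
  aLoop function_words enum_hypothesis.length enum_hypothesis enum_reference [] []

-- ===== PORT B =====
-- 'for rid, word in enum_reference: stacks.setdefault(word, []).append(rid)'
def bStacks (ref : List (Int × String)) : PySem.Dict String (List Int) :=
  ref.foldl (fun d x => d.modify x.2 [] (fun l => l ++ [x.1])) PySem.Dict.empty

-- main loop over reversed(enum_hypothesis); state: stacks dict, popped counter, both match lists, kept_rev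
def bLoop (fw : PySem.Set String) :
    List (Int × String) → PySem.Dict String (List Int) → PySem.Dict String Int →
    List (Int × Int) → List (Int × Int) → List (Int × String) →
    (PySem.Dict String Int) × (List (Int × Int)) × (List (Int × Int)) × (List (Int × String))
  | [], _, popped, cwm, fwm, keptRev => (popped, cwm, fwm, keptRev)
  | h :: t, stks, popped, cwm, fwm, keptRev =>
    -- 's = stacks.get(item[1]); if s: rid = s.pop() …': s is falsy exactly when the stored stack is
    -- absent or empty, i.e. when pop? of the looked-up list (default []) returns none
    match PySem.List.pop? (stks.getD h.2 []) with
    | none => bLoop fw t stks popped cwm fwm (keptRev ++ [h])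
    | some (rid, s') =>
        if h.2 ∈ fw then
          bLoop fw t (stks.insert h.2 s') (popped.insert h.2 (popped.getD h.2 0 + 1)) cwm (fwm ++ [(rid, h.1)]) keptRev
        else
          bLoop fw t (stks.insert h.2 s') (popped.insert h.2 (popped.getD h.2 0 + 1)) (cwm ++ [(rid, h.1)]) fwm keptRev

-- 'for item in reversed(enum_reference): skip it while popped[word] counts down, else keep it'
def bDrop : List (Int × String) → PySem.Dict String Int → List (Int × String) → List (Int × String)
  | [], _, acc => acc
  | x :: xs, popped, acc =>
    if popped.getD x.2 0 ≠ 0 then bDrop xs (popped.insert x.2 (popped.getD x.2 0 - 1)) acc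
    else bDrop xs popped (acc ++ [x])

def match_enums_py_alt (enum_reference : List (Int × String)) (enum_hypothesis : List (Int × String)) (function_words : List String) : (List (Int × Int)) × (List (Int × Int)) × (List (Int × String)) × (List (Int × String)) :=
  let r := bLoop (PySem.Set.ofList function_words) enum_hypothesis.reverse (bStacks enum_reference) PySem.Dict.empty [] [] []
  (r.2.1, r.2.2.1, (bDrop enum_reference.reverse r.1 []).reverse, r.2.2.2.reverse)

-- ===== PRECONDITION & SPEC =====
def Spec_match_enums_py (enum_reference : List (Int × String)) (enum_hypothesis : List (Int × String)) (function_words : List String) (out : (List (Int × Int)) × (List (Int × Int)) × (List (Int × String)) × (List (Int × String))) : Prop := out = match_enums_py_alt enum_reference enum_hypothesis function_words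
instance (enum_reference : List (Int × String)) (enum_hypothesis : List (Int × String)) (function_words : List String) (out : (List (Int × Int)) × (List (Int × Int)) × (List (Int × String)) × (List (Int × String))) : Decidable (Spec_match_enums_py enum_reference enum_hypothesis function_words out) := by unfold Spec_match_enums_py; infer_instance

-- ===== CLAIM (what is proved, stated in full; the proofs are below) =====
def Claim_equal_match_enums_py : Prop := ∀ (enum_reference : List (Int × String)) (enum_hypothesis : List (Int × String)) (function_words : List String), Dom_match_enums_py enum_reference enum_hypothesis function_words → Spec_match_enums_py enum_reference enum_hypothesis function_words (match_enums_py enum_reference enum_hypothesis function_words)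

-- ===== LEMMAS AND PROOFS =====

-- middle spec: both loops, seen as one pass over the reversed hypothesis against a shrinking remaining-reference list
def mid (fws : List String) :
    List (Int × String) → List (Int × String) → List (Int × Int) → List (Int × Int) → List (Int × String) →
    (List (Int × Int)) × (List (Int × Int)) × (List (Int × String)) × (List (Int × String))
  | [], rem, cwm, fwm, keep => (cwm, fwm, rem, keep)
  | h :: t, rem, cwm, fwm, keep =>
    match aFindJ rem h.2 rem.length with
    | none => mid fws t rem cwm fwm (h :: keep)
    | some j =>
      if h.2 ∈ fws then
        mid fws t (rem.eraseIdx j) cwm (fwm ++ [((rem.getD j (0, "")).1, h.1)]) keep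
      else
        mid fws t (rem.eraseIdx j) (cwm ++ [((rem.getD j (0, "")).1, h.1)]) fwm keep

-- remove the first element carrying word w (A's removal, seen from the reversed side)
def removeFirst (w : String) : List (Int × String) → List (Int × String)
  | [] => []
  | x :: xs => if x.2 = w then xs else x :: removeFirst w xs

-- drop, per word, the first f(word) occurrences (functional reading of bDrop's counter walk)
def dropC (f : String → Nat) : List (Int × String) → List (Int × String)
  | [] => []
  | x :: xs => if f x.2 = 0 then x :: dropC f xs else dropC (fun v => if v = x.2 then f x.2 - 1 else f v) xs

-- step equations (match scrutinees made explicit so that later rewriting is plain)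
lemma aLoop_step_none (fws : List String) (i : Nat) (hyp ref : List (Int × String)) (cwm fwm : List (Int × Int))
    (h : aFindJ ref (PySem.List.pyGetD hyp (i : Int) (0, "")).2 ref.length = none) :
    aLoop fws (i + 1) hyp ref cwm fwm = aLoop fws i hyp ref cwm fwm := by
  rw [aLoop, h]

lemma aLoop_step_some (fws : List String) (i : Nat) (hyp ref : List (Int × String)) (cwm fwm : List (Int × Int))
    (j : Nat) (h : aFindJ ref (PySem.List.pyGetD hyp (i : Int) (0, "")).2 ref.length = some j) :
    aLoop fws (i + 1) hyp ref cwm fwm =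
      if (PySem.List.pyGetD hyp (i : Int) (0, "")).2 ∈ fws then
        aLoop fws i (hyp.eraseIdx i) (ref.eraseIdx j) cwm
          (fwm ++ [((PySem.List.pyGetD ref (j : Int) (0, "")).1, (PySem.List.pyGetD hyp (i : Int) (0, "")).1)])
      else
        aLoop fws i (hyp.eraseIdx i) (ref.eraseIdx j)
          (cwm ++ [((PySem.List.pyGetD ref (j : Int) (0, "")).1, (PySem.List.pyGetD hyp (i : Int) (0, "")).1)]) fwm := by
  rw [aLoop, h]

lemma mid_step_none (fws : List String) (h : Int × String) (t rem : List (Int × String)) (cwm fwm : List (Int × Int))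
    (keep : List (Int × String)) (hf : aFindJ rem h.2 rem.length = none) :
    mid fws (h :: t) rem cwm fwm keep = mid fws t rem cwm fwm (h :: keep) := by
  rw [mid, hf]

lemma mid_step_some (fws : List String) (h : Int × String) (t rem : List (Int × String)) (cwm fwm : List (Int × Int))
    (keep : List (Int × String)) (j : Nat) (hf : aFindJ rem h.2 rem.length = some j) :
    mid fws (h :: t) rem cwm fwm keep =
      if h.2 ∈ fws then mid fws t (rem.eraseIdx j) cwm (fwm ++ [((rem.getD j (0, "")).1, h.1)]) keep
      else mid fws t (rem.eraseIdx j) (cwm ++ [((rem.getD j (0, "")).1, h.1)]) fwm keep := by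
  rw [mid, hf]

lemma bLoop_step_kept (fw : PySem.Set String) (h : Int × String) (t : List (Int × String))
    (stks : PySem.Dict String (List Int)) (popped : PySem.Dict String Int) (cwm fwm : List (Int × Int))
    (keptRev : List (Int × String)) (hg : stks.getD h.2 [] = []) :
    bLoop fw (h :: t) stks popped cwm fwm keptRev = bLoop fw t stks popped cwm fwm (keptRev ++ [h]) := by
  rw [bLoop, hg]
  rfl

lemma bLoop_step_pop (fw : PySem.Set String) (h : Int × String) (t : List (Int × String))
    (stks : PySem.Dict String (List Int)) (popped : PySem.Dict String Int) (cwm fwm : List (Int × Int))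
    (keptRev : List (Int × String)) (rid : Int) (s' : List Int)
    (hp : PySem.List.pop? (stks.getD h.2 []) = some (rid, s')) :
    bLoop fw (h :: t) stks popped cwm fwm keptRev =
      if h.2 ∈ fw then
        bLoop fw t (stks.insert h.2 s') (popped.insert h.2 (popped.getD h.2 0 + 1)) cwm (fwm ++ [(rid, h.1)]) keptRev
      else
        bLoop fw t (stks.insert h.2 s') (popped.insert h.2 (popped.getD h.2 0 + 1)) (cwm ++ [(rid, h.1)]) fwm keptRev := by
  rw [bLoop, hp]

lemma aFindJ_lt (ref : List (Int × String)) (w : String) :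
    ∀ m j, aFindJ ref w m = some j → j < m := by
  intro m
  induction m with
  | zero => intro j h; simp [aFindJ] at h
  | succ m ih =>
    intro j h
    rw [aFindJ] at h
    split at h
    · injection h with h'
      omega
    · exact Nat.lt_succ_of_lt (ih j h)

lemma aFindJ_append (l : List (Int × String)) (y : Int × String) (w : String) :
    ∀ m, m ≤ l.length → aFindJ (l ++ [y]) w m = aFindJ l w m := by
  intro m
  induction m with
  | zero => intro; rfl
  | succ m ih =>
    intro hm
    rw [aFindJ, aFindJ, List.getD_append _ _ _ _ (by omega), ih (by omega)]

lemma core (w : String) : ∀ ys : List (Int × String),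
    (ys.find? (fun x => x.2 == w) = none ∧ aFindJ ys.reverse w ys.reverse.length = none) ∨
    (∃ j y, ys.find? (fun x => x.2 == w) = some y ∧ aFindJ ys.reverse w ys.reverse.length = some j ∧
      ys.reverse.getD j (0, "") = y ∧ ys.reverse.eraseIdx j = (removeFirst w ys).reverse) := by
  intro ys
  induction ys with
  | nil => left; constructor <;> rfl
  | cons y t ih =>
    have hrev : (y :: t).reverse = t.reverse ++ [y] := by simp
    have hlen : (t.reverse ++ [y]).length = t.reverse.length + 1 := by simp
    have hgetD : (t.reverse ++ [y]).getD t.reverse.length (0, "") = y := by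
      rw [List.getD_append_right _ _ _ _ (le_refl _)]
      simp
    have herase : (t.reverse ++ [y]).eraseIdx t.reverse.length = t.reverse := by
      rw [List.eraseIdx_eq_take_drop_succ, List.take_left, List.drop_eq_nil_of_le (by simp)]
      simp
    by_cases hw : y.2 = w
    · right
      refine ⟨t.reverse.length, y, ?_, ?_, ?_, ?_⟩
      · simp [hw]
      · rw [hrev, hlen, aFindJ, hgetD, if_pos hw]
      · rw [hrev]; exact hgetD
      · rw [hrev, herase]
        simp [removeFirst, hw]
    · have hstep : aFindJ (t.reverse ++ [y]) w (t.reverse.length + 1) = aFindJ t.reverse w t.reverse.length := by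
        rw [aFindJ, hgetD, if_neg hw, aFindJ_append _ _ _ _ (le_refl _)]
      rcases ih with ⟨hf, ha⟩ | ⟨j, z, hf, ha, hg, he⟩
      · left
        refine ⟨?_, ?_⟩
        · simp [hw, hf]
        · rw [hrev, hlen, hstep]; exact ha
      · right
        have hj : j < t.reverse.length := aFindJ_lt _ _ _ _ ha
        refine ⟨j, z, ?_, ?_, ?_, ?_⟩
        · simp [hw, hf]
        · rw [hrev, hlen, hstep]; exact ha
        · rw [hrev, List.getD_append _ _ _ _ hj]; exact hg
        · rw [hrev, List.eraseIdx_append_of_lt_length hj, he]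
          simp [removeFirst, hw]

lemma removeFirst_filter_same (w : String) : ∀ ys : List (Int × String),
    (removeFirst w ys).filter (fun x => x.2 == w) = (ys.filter (fun x => x.2 == w)).tail := by
  intro ys
  induction ys with
  | nil => rfl
  | cons y t ih =>
    by_cases hw : y.2 = w
    · simp [removeFirst, hw]
    · simp [removeFirst, hw, ih]

lemma removeFirst_filter_other (w v : String) (hvw : v ≠ w) : ∀ ys : List (Int × String),
    (removeFirst w ys).filter (fun x => x.2 == v) = ys.filter (fun x => x.2 == v) := by
  intro ys
  induction ys with
  | nil => rfl
  | cons y t ih =>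
    by_cases hw : y.2 = w
    · have hwv : ¬ (w = v) := fun hh => hvw hh.symm
      simp [removeFirst, hw, hwv]
    · simp [removeFirst, hw, List.filter_cons, ih]

lemma find?_rev_eq (p : Int × String → Bool) : ∀ rem : List (Int × String),
    rem.reverse.find? p = (rem.filter p).getLast? := by
  intro rem
  induction rem with
  | nil => rfl
  | cons x t ih =>
    have hrev : (x :: t).reverse = t.reverse ++ [x] := by simp
    rw [hrev, List.find?_append, ih, List.filter_cons]
    cases htf : (t.filter p).getLast? with
    | none =>
      have ht : t.filter p = [] := List.getLast?_eq_none_iff.mp htf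
      by_cases hx : p x = true <;> simp [ht, hx]
    | some z =>
      cases hq : t.filter p with
      | nil => rw [hq] at htf; simp at htf
      | cons b l =>
        have hL : (x :: b :: l).getLast? = some z := by
          rw [List.getLast?_cons_cons, ← hq, htf]
        by_cases hx : p x = true
        · rw [if_pos hx, hL]; simp
        · rw [if_neg hx, ← hq, htf]; simp

lemma dropC_zero : ∀ xs : List (Int × String), dropC (fun _ => 0) xs = xs := by
  intro xs
  induction xs with
  | nil => rfl
  | cons x t ih => simp [dropC, ih]

lemma removeFirst_dropC (w : String) : ∀ (xs : List (Int × String)) (f : String → Nat),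
    removeFirst w (dropC f xs) = dropC (fun v => if v = w then f v + 1 else f v) xs := by
  intro xs
  induction xs with
  | nil => intro f; rfl
  | cons x t ih =>
    intro f
    by_cases hx : f x.2 = 0
    · by_cases hw : x.2 = w
      · subst hw
        rw [dropC, if_pos hx, removeFirst, if_pos rfl, dropC, if_neg (by simp)]
        congr 1
        funext v
        by_cases hv : v = x.2 <;> simp [hv, hx]
      · rw [dropC, if_pos hx, removeFirst, if_neg hw, dropC, if_pos (by simp [hw, hx])]
        rw [ih f]
    · have hb : (if x.2 = w then f x.2 + 1 else f x.2) ≠ 0 := by split <;> omega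
      rw [dropC, if_neg hx, dropC, if_neg hb, ih]
      congr 1
      funext v
      by_cases h2 : x.2 = w
      · subst h2
        by_cases h1 : v = x.2 <;> simp [h1, hx] <;> omega
      · by_cases h1 : v = x.2
        · simp [h1, h2]
        · simp [h1]

lemma mid_keep_acc (fws : List String) : ∀ (t rem : List (Int × String)) (cwm fwm : List (Int × Int))
    (keep : List (Int × String)),
    mid fws t rem cwm fwm keep =
      ((mid fws t rem cwm fwm []).1, (mid fws t rem cwm fwm []).2.1,
       (mid fws t rem cwm fwm []).2.2.1, (mid fws t rem cwm fwm []).2.2.2 ++ keep) := by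
  intro t
  induction t with
  | nil => intros; simp [mid]
  | cons h t ih =>
    intro rem cwm fwm keep
    cases hf : aFindJ rem h.2 rem.length with
    | none =>
      rw [mid_step_none fws h t rem cwm fwm keep hf, mid_step_none fws h t rem cwm fwm [] hf]
      rw [ih rem cwm fwm (h :: keep), ih rem cwm fwm [h]]
      simp
    | some j =>
      rw [mid_step_some fws h t rem cwm fwm keep j hf, mid_step_some fws h t rem cwm fwm [] j hf]
      by_cases hc : h.2 ∈ fws
      · simp only [if_pos hc]
        exact ih _ _ _ _
      · simp only [if_neg hc]
        exact ih _ _ _ _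

lemma L1 (fws : List String) : ∀ (i : Nat) (hyp ref : List (Int × String)) (cwm fwm : List (Int × Int)),
    i ≤ hyp.length →
    aLoop fws i hyp ref cwm fwm = mid fws ((hyp.take i).reverse) ref cwm fwm (hyp.drop i) := by
  intro i
  induction i with
  | zero => intros; simp [aLoop, mid]
  | succ i ih =>
    intro hyp ref cwm fwm hle
    have hi : i < hyp.length := hle
    have hget : PySem.List.pyGetD hyp (i : Int) (0, "") = hyp[i] := by
      rw [PySem.List.pyGetD_natCast, List.getD_eq_getElem?_getD, List.getElem?_eq_getElem hi]
      rfl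
    have htake : (hyp.take (i + 1)).reverse = hyp[i] :: (hyp.take i).reverse := by
      rw [List.take_add_one, List.getElem?_eq_getElem hi]
      simp
    have hdrop : hyp.drop i = hyp[i] :: hyp.drop (i + 1) := List.drop_eq_getElem_cons hi
    rw [htake]
    cases hfind : aFindJ ref hyp[i].2 ref.length with
    | none =>
      rw [aLoop_step_none fws i hyp ref cwm fwm (by rw [hget]; exact hfind)]
      rw [mid_step_none fws hyp[i] _ ref cwm fwm _ hfind]
      rw [ih hyp ref cwm fwm (by omega), hdrop]
    | some j =>
      have htake' : (hyp.eraseIdx i).take i = hyp.take i :=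
        List.take_eraseIdx_eq_take_of_le hyp i i (le_refl i)
      have hdrop' : (hyp.eraseIdx i).drop i = hyp.drop (i + 1) := by
        rw [List.eraseIdx_eq_take_drop_succ]
        exact List.drop_left' (by simp [List.length_take]; omega)
      have hlen' : i ≤ (hyp.eraseIdx i).length := by
        rw [List.length_eraseIdx_of_lt hi]; omega
      have hgetr : PySem.List.pyGetD ref (j : Int) (0, "") = ref.getD j (0, "") :=
        PySem.List.pyGetD_natCast ref j (0, "")
      rw [aLoop_step_some fws i hyp ref cwm fwm j (by rw [hget]; exact hfind)]
      rw [mid_step_some fws hyp[i] _ ref cwm fwm _ j hfind]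
      rw [hget, hgetr]
      by_cases hc : hyp[i].2 ∈ fws
      · simp only [if_pos hc]
        rw [ih _ _ _ _ hlen', htake', hdrop']
      · simp only [if_neg hc]
        rw [ih _ _ _ _ hlen', htake', hdrop']

lemma bStacks_getD (ref : List (Int × String)) (w : String) :
    (bStacks ref).getD w [] = (ref.filter (fun x => x.2 == w)).map Prod.fst := by
  unfold bStacks
  have hmap : ref.foldl (fun d x => d.modify x.2 [] (fun l => l ++ [x.1])) PySem.Dict.empty
      = (ref.map (fun x => (x.2, x.1))).foldl (fun d p => d.modify p.1 [] (fun l => l ++ [p.2])) PySem.Dict.empty := by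
    rw [List.foldl_map]
  rw [hmap, PySem.Dict.getD_foldl_modify_append, List.filter_map]
  simp [Function.comp_def, List.map_map]

lemma bDrop_eq : ∀ (xs : List (Int × String)) (popped : PySem.Dict String Int) (acc : List (Int × String)),
    (∀ v, 0 ≤ popped.getD v 0) →
    bDrop xs popped acc = acc ++ dropC (fun v => (popped.getD v 0).toNat) xs := by
  intro xs
  induction xs with
  | nil => intros; simp [bDrop, dropC]
  | cons x t ih =>
    intro popped acc hnn
    by_cases hz : popped.getD x.2 0 = 0
    · rw [bDrop, if_neg (by simp [hz]), ih popped _ hnn, dropC, if_pos (by simp [hz])]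
      simp
    · rw [bDrop, if_pos (by simp [hz]), dropC, if_neg (by have := hnn x.2; omega)]
      rw [ih _ _ (by
        intro v
        rw [PySem.Dict.getD_insert]
        split
        · have := hnn x.2; omega
        · exact hnn v)]
      congr 2
      funext v
      rw [PySem.Dict.getD_insert]
      have hx2 := hnn x.2
      by_cases hv : v = x.2 <;> simp [hv] <;> omega

lemma L2 (fws : List String) (refR : List (Int × String)) :
    ∀ (hypRev rem : List (Int × String)) (stks : PySem.Dict String (List Int)) (popped : PySem.Dict String Int)
      (cwm fwm : List (Int × Int)) (keptRev : List (Int × String)),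
    (∀ w, stks.getD w [] = (rem.filter (fun x => x.2 == w)).map Prod.fst) →
    (∀ w, 0 ≤ popped.getD w 0) →
    rem.reverse = dropC (fun v => (popped.getD v 0).toNat) refR →
    ∃ popped',
      bLoop (PySem.Set.ofList fws) hypRev stks popped cwm fwm keptRev
        = (popped', (mid fws hypRev rem cwm fwm []).1, (mid fws hypRev rem cwm fwm []).2.1,
           keptRev ++ (mid fws hypRev rem cwm fwm []).2.2.2.reverse)
      ∧ (∀ w, 0 ≤ popped'.getD w 0)
      ∧ (mid fws hypRev rem cwm fwm []).2.2.1.reverse = dropC (fun v => (popped'.getD v 0).toNat) refR := by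
  intro hypRev
  induction hypRev with
  | nil =>
    intro rem stks popped cwm fwm keptRev hst hnn hcnt
    refine ⟨popped, ?_, hnn, ?_⟩
    · rw [bLoop, mid]; simp
    · rw [mid]; exact hcnt
  | cons h t ih =>
    intro rem stks popped cwm fwm keptRev hst hnn hcnt
    have hcore := core h.2 rem.reverse
    simp only [List.reverse_reverse] at hcore
    rw [find?_rev_eq] at hcore
    cases hfil : rem.filter (fun x => x.2 == h.2) with
    | nil =>
      rw [hfil] at hcore
      rcases hcore with ⟨-, hmidn⟩ | ⟨j, y, hf, -⟩
      · -- no occurrence of the word: kept on both sides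
        have hsemp : stks.getD h.2 [] = [] := by rw [hst, hfil]; rfl
        obtain ⟨p', h1, h2, h3⟩ := ih rem stks popped cwm fwm (keptRev ++ [h]) hst hnn hcnt
        refine ⟨p', ?_, h2, ?_⟩
        · rw [bLoop_step_kept _ _ _ _ _ _ _ _ hsemp, h1,
            mid_step_none fws h t rem cwm fwm [] hmidn, mid_keep_acc fws t rem cwm fwm [h]]
          simp
        · rw [mid_step_none fws h t rem cwm fwm [] hmidn, mid_keep_acc fws t rem cwm fwm [h]]
          exact h3
      · exact absurd hf (by simp)
    | cons a as =>
      rcases hcore with ⟨hf, -⟩ | ⟨j, z, hf, ha, hg, he⟩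
      · rw [List.getLast?_eq_none_iff, hfil] at hf
        cases hf
      -- the stack for this word is the fst-projection of the filtered remainder; pop its last element
      have hsval : stks.getD h.2 [] = ((rem.filter (fun x => x.2 == h.2)).map Prod.fst) := hst h.2
      have hpop : PySem.List.pop? (stks.getD h.2 []) =
          some (z.1, ((rem.filter (fun x => x.2 == h.2)).map Prod.fst).dropLast) := by
        have hsp : ((rem.filter (fun x => x.2 == h.2)).map Prod.fst).dropLast ++ [z.1]
            = (rem.filter (fun x => x.2 == h.2)).map Prod.fst := by
          apply List.dropLast_append_getLast?
          rw [List.getLast?_map, hf]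
          rfl
        rw [hsval]
        calc PySem.List.pop? ((rem.filter (fun x => x.2 == h.2)).map Prod.fst)
            = PySem.List.pop? (((rem.filter (fun x => x.2 == h.2)).map Prod.fst).dropLast ++ [z.1]) := by
              rw [hsp]
          _ = some (z.1, ((rem.filter (fun x => x.2 == h.2)).map Prod.fst).dropLast) :=
              PySem.List.pop?_last _ _
      -- the matched pair is the same one A records
      have hgv : rem.getD j (0, "") = z := hg
      -- invariants after the pop
      have hst' : ∀ w, (stks.insert h.2 ((rem.filter (fun x => x.2 == h.2)).map Prod.fst).dropLast).getD w [] =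
          ((rem.eraseIdx j).filter (fun x => x.2 == w)).map Prod.fst := by
        intro w
        rw [PySem.Dict.getD_insert]
        by_cases hvw : w = h.2
        · subst hvw
          rw [if_pos rfl, he, List.filter_reverse, removeFirst_filter_same, List.filter_reverse,
            List.tail_reverse, List.reverse_reverse, List.map_dropLast]
        · rw [if_neg hvw, hst w, he, List.filter_reverse,
            removeFirst_filter_other h.2 w (by exact fun hh => hvw hh), List.filter_reverse,
            List.reverse_reverse]
      have hnn' : ∀ w, 0 ≤ (popped.insert h.2 (popped.getD h.2 0 + 1)).getD w 0 := by
        intro w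
        rw [PySem.Dict.getD_insert]
        split
        · have := hnn h.2; omega
        · exact hnn w
      have hcnt' : (rem.eraseIdx j).reverse =
          dropC (fun v => ((popped.insert h.2 (popped.getD h.2 0 + 1)).getD v 0).toNat) refR := by
        rw [he, List.reverse_reverse, hcnt, removeFirst_dropC]
        congr 1
        funext v
        rw [PySem.Dict.getD_insert]
        have hh2 := hnn h.2
        by_cases hv : v = h.2 <;> simp [hv] <;> omega
      by_cases hc : h.2 ∈ fws
      · obtain ⟨p', h1, h2, h3⟩ :=
          ih (rem.eraseIdx j) (stks.insert h.2 ((rem.filter (fun x => x.2 == h.2)).map Prod.fst).dropLast)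
            (popped.insert h.2 (popped.getD h.2 0 + 1))
            cwm (fwm ++ [(z.1, h.1)]) keptRev hst' hnn' hcnt'
        refine ⟨p', ?_, h2, ?_⟩
        · rw [bLoop_step_pop _ _ _ _ _ _ _ _ _ _ hpop,
            if_pos ((PySem.Set.mem_ofList fws h.2).mpr hc), h1,
            mid_step_some fws h t rem cwm fwm [] j ha, if_pos hc, hgv]
        · rw [mid_step_some fws h t rem cwm fwm [] j ha, if_pos hc, hgv]
          exact h3
      · obtain ⟨p', h1, h2, h3⟩ :=
          ih (rem.eraseIdx j) (stks.insert h.2 ((rem.filter (fun x => x.2 == h.2)).map Prod.fst).dropLast)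
            (popped.insert h.2 (popped.getD h.2 0 + 1))
            (cwm ++ [(z.1, h.1)]) fwm keptRev hst' hnn' hcnt'
        refine ⟨p', ?_, h2, ?_⟩
        · rw [bLoop_step_pop _ _ _ _ _ _ _ _ _ _ hpop,
            if_neg (fun hin => hc ((PySem.Set.mem_ofList fws h.2).mp hin)), h1,
            mid_step_some fws h t rem cwm fwm [] j ha, if_neg hc, hgv]
        · rw [mid_step_some fws h t rem cwm fwm [] j ha, if_neg hc, hgv]
          exact h3

-- ===== VERDICT (by name: the statement is the Claim_ definition above) =====
theorem match_enums_py_spec : Claim_equal_match_enums_py := by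
  intro er eh fws _
  unfold Spec_match_enums_py
  have hA : match_enums_py er eh fws = mid fws eh.reverse er [] [] [] := by
    unfold match_enums_py
    rw [L1 fws eh.length eh er [] [] (le_refl _)]
    simp
  obtain ⟨p', h1, h2, h3⟩ := L2 fws er.reverse eh.reverse er (bStacks er) PySem.Dict.empty [] [] []
    (fun w => bStacks_getD er w)
    (fun w => by simp)
    (by
      have habs : (fun v => ((PySem.Dict.empty.getD v (0 : Int)).toNat)) = (fun _ : String => 0) := by
        funext v; simp
      rw [habs, dropC_zero])
  rw [hA]
  unfold match_enums_py_alt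
  rw [h1]
  simp [bDrop_eq er.reverse p' [] h2, ← h3]
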